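-- pv_equiv track=rewrite | github.com/smallbee3/algorithm-problems | python/testdome/13_test_1.py | nth_most_rare
-- ===== SOURCE A (Python) =====
-- def nth_most_rare(elements, n):
--
--     adict = {}
--     for i in elements:
--         if adict.get(i):
--             adict[i] += 1
--         else:
--             adict[i] = 1
--
--     # sorted_adtic = sorted(adict, key=adict.values)
--
--     sorted_list = [list(adict.keys())[0]]
--
--     for i in list(adict.keys())[1:]:
--         for idx, j in enumerate(sorted_list):
--             if adict[i] < adict[j]:
--                 sorted_list.insert(idx, i)
--                 break
--             if idx == len(sorted_list)-1:
--                 sorted_list.insert(idx+1, i)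
--                 break
--
--     return sorted_list[n-1]
-- ===== SOURCE B (Python) =====
-- def nth_most_rare(elements, n):
--     counts = {}
--     order = []
--     for x in elements:
--         if x in counts:
--             counts[x] += 1
--         else:
--             counts[x] = 1
--             order.append(x)
--     buckets = {}
--     for x in order:
--         buckets.setdefault(counts[x], []).append(x)
--     ranked = []
--     for c in sorted(buckets):
--         ranked.extend(buckets[c])
--     return ranked[n - 1]
-- ===== Notes on version B (the rewrite author's own statement) =====
-- stated objective: faster
-- what changed: Replaces A's manual insertion sort (each new key re-scans the partially sorted list) by a frequency-bucket table keyed by count, whose distinct count values are sorted once and whose buckets are concatenated in one pass.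
import Mathlib
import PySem

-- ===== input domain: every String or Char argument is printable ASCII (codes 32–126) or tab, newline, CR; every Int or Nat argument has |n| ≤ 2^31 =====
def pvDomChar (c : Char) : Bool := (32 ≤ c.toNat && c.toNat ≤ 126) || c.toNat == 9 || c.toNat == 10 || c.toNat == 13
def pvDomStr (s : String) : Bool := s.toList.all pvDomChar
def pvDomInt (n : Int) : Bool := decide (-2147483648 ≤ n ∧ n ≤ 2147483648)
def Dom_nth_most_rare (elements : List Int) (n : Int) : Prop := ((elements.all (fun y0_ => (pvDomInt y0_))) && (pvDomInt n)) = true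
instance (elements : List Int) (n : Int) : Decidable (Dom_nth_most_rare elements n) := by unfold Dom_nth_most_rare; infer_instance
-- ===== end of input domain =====

-- B replaces A's repeated-scan manual insertion sort of the distinct keys by a
-- frequency-bucket table whose sorted distinct count values are flattened in one pass.

-- ===== PORT A =====
-- A's inner 'for idx, j in enumerate(sorted_list): … break' scan (insert before the
-- first j with adict[i] < adict[j], else append after the last index).
def pvScanIns (d : PySem.Dict Int Int) (i : Int) : List Int → List Int
  | [] => []
  | j :: rest =>
      if d.getD i 0 < d.getD j 0 then i :: j :: rest
      else if rest = [] then [j, i]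
      else j :: pvScanIns d i rest

-- 'if adict.get(i):' — get returns None (read as 0) or a positive count, so the test is '≠ 0';
-- inside the loop adict[i]/adict[j] are present keys, read with getD.
def nth_most_rare (elements : List Int) (n : Int) : Int :=
  let adict := elements.foldl
    (fun d i => if (d.get? i).getD 0 ≠ 0 then d.insert i (d.getD i 0 + 1) else d.insert i 1)
    PySem.Dict.empty
  let sorted_list := (PySem.List.slice adict.keys (some 1) none).foldl
    (fun sl i => pvScanIns adict i sl) [PySem.List.pyGetD adict.keys 0 0]
  PySem.List.pyGetD sorted_list (n - 1) 0

-- ===== PORT B =====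
-- 'buckets.setdefault(counts[x], []).append(x)' mutates the stored list in place = Dict.modify.
def nth_most_rare_alt (elements : List Int) (n : Int) : Int :=
  let st := elements.foldl
    (fun (st : PySem.Dict Int Int × List Int) x =>
      if st.1.contains x then (st.1.insert x (st.1.getD x 0 + 1), st.2)
      else (st.1.insert x 1, st.2 ++ [x]))
    (PySem.Dict.empty, [])
  let buckets := st.2.foldl
    (fun (b : PySem.Dict Int (List Int)) x => b.modify (st.1.getD x 0) [] (· ++ [x]))
    PySem.Dict.empty
  let ranked := (PySem.List.sorted buckets.keys (fun v => v) false).foldl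
    (fun acc c => acc ++ buckets.getD c []) []
  PySem.List.pyGetD ranked (n - 1) 0

-- ===== PRECONDITION & SPEC =====
-- A raises IndexError on elements = [] (list(adict.keys())[0]) and when n-1 is not a valid
-- Python index into the list of distinct elements; exactly those inputs are excluded.
def Pre_nth_most_rare (elements : List Int) (n : Int) : Prop :=
  elements ≠ [] ∧ PySem.Raise.InRange (PySem.Set.ofList elements).length (n - 1)
instance (elements : List Int) (n : Int) : Decidable (Pre_nth_most_rare elements n) := by
  unfold Pre_nth_most_rare; infer_instance
def pvWitness_nth_most_rare : List Int × Int := ([5, 3, 5, 2, 3, 5], 2)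

def Spec_nth_most_rare (elements : List Int) (n : Int) (out : Int) : Prop := out = nth_most_rare_alt elements n
instance (elements : List Int) (n : Int) (out : Int) : Decidable (Spec_nth_most_rare elements n out) := by unfold Spec_nth_most_rare; infer_instance

-- ===== CLAIM (what is proved, stated in full; the proofs are below) =====
def Claim_equal_nth_most_rare : Prop := ∀ (elements : List Int) (n : Int), Dom_nth_most_rare elements n → Pre_nth_most_rare elements n → Spec_nth_most_rare elements n (nth_most_rare elements n)

-- ===== LEMMAS AND PROOFS =====

def pvFlat (f : Int → Int) (ks : List Int) : List Int :=
  (PySem.List.sorted (PySem.Set.ofList (ks.map f)) (fun v => v) false).flatMap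
    (fun v => ks.filter (fun k => f k == v))

theorem pvInsertBy_ne_nil (before : Int → Int → Bool) (x : Int) (ys : List Int) :
    PySem.List.insertBy before x ys ≠ [] := by
  cases ys with
  | nil => simp [PySem.List.insertBy]
  | cons j rest => unfold PySem.List.insertBy; split <;> simp

theorem pvTri (q : Int) (S : List Int) (hS : S.Pairwise (· < ·)) :
    S = S.filter (· < q) ++ S.filter (· = q) ++ S.filter (q < ·) := by
  induction S with
  | nil => simp
  | cons s t ih =>
      have ht := ih hS.of_cons
      have hgt : ∀ a ∈ t, s < a := fun a ha => List.rel_of_pairwise_cons hS ha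
      rcases lt_trichotomy s q with h | h | h
      · simp only [List.filter_cons, decide_eq_true_eq]
        rw [if_pos h, if_neg (by omega), if_neg (by omega)]
        simpa using ht
      · subst h
        have h1 : t.filter (· < s) = [] := List.filter_eq_nil_iff.2 (fun a ha => by simp; have := hgt a ha; omega)
        have h2 : t.filter (· = s) = [] := List.filter_eq_nil_iff.2 (fun a ha => by simp; have := hgt a ha; omega)
        have h3 : t.filter (s < ·) = t := List.filter_eq_self.2 (fun a ha => by simp; exact hgt a ha)
        simp only [List.filter_cons, decide_eq_true_eq]
        rw [if_neg (by omega)]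
        simp only [if_neg (lt_irrefl s), h1, h2, h3]
        simp
      · have h1 : ∀ a ∈ s :: t, q < a := by
          intro a ha; rcases List.mem_cons.1 ha with rfl | ha; · exact h
          · exact lt_trans h (hgt a ha)
        have e1 : (s :: t).filter (· < q) = [] := List.filter_eq_nil_iff.2 (fun a ha => by simp; have := h1 a ha; omega)
        have e2 : (s :: t).filter (· = q) = [] := List.filter_eq_nil_iff.2 (fun a ha => by simp; have := h1 a ha; omega)
        have e3 : (s :: t).filter (q < ·) = s :: t := List.filter_eq_self.2 (fun a ha => by simp; exact h1 a ha)
        rw [e1, e2, e3]; simp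

theorem pvFilterEq (q : Int) (S : List Int) (hS : S.Pairwise (· < ·)) :
    S.filter (· = q) = if q ∈ S then [q] else [] := by
  induction S with
  | nil => simp
  | cons s t ih =>
      have hgt : ∀ a ∈ t, s < a := fun a ha => List.rel_of_pairwise_cons hS ha
      by_cases h : s = q
      · subst h
        have h2 : t.filter (· = s) = [] := List.filter_eq_nil_iff.2 (fun a ha => by simp; have := hgt a ha; omega)
        simp [h2]
      · rw [List.filter_cons, if_neg (by simpa using h), ih hS.of_cons]
        have hm : (q ∈ s :: t) ↔ (q ∈ t) := by
          simp only [List.mem_cons]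
          constructor
          · rintro (rfl | hh); · exact absurd rfl h
            · exact hh
          · exact Or.inr
        by_cases hq : q ∈ t
        · rw [if_pos (hm.2 hq), if_pos hq]
        · rw [if_neg (fun c => hq (hm.1 c)), if_neg hq]

theorem pvInsertBy_split (before : Int → Int → Bool) (x : Int) (u w : List Int)
    (hu : ∀ j ∈ u, before x j = false) (hw : ∀ j ∈ w, before x j = true) :
    PySem.List.insertBy before x (u ++ w) = u ++ x :: w := by
  induction u with
  | nil =>
      simp only [List.nil_append]
      cases w with
      | nil => simp [PySem.List.insertBy]
      | cons h t => unfold PySem.List.insertBy; simp [hw h (by simp)]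
  | cons a u ih =>
      have ha : before x a = false := hu a (by simp)
      have h2 := ih (fun j hj => hu j (by simp [hj]))
      simp only [List.cons_append]
      unfold PySem.List.insertBy
      simp [ha, ← h2]

theorem pvStep (f : Int → Int) (ks : List Int) (x : Int) :
    PySem.List.insertBy (fun a b => decide (f a < f b)) x (pvFlat f ks) = pvFlat f (ks ++ [x]) := by
  set q := f x with hq
  set V := PySem.Set.ofList (ks.map f) with hV
  set S := PySem.List.sorted V (fun v => v) false with hS
  set bucket := fun v => ks.filter (fun k => f k == v) with hbucket
  have hperm : S.Perm V := PySem.List.sorted_perm V (fun v => v) false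
  have hnd : S.Nodup := hperm.nodup_iff.2 (PySem.Set.nodup_ofList _)
  have hle : S.Pairwise (fun a b => a ≤ b) := PySem.List.sorted_pairwise V (fun v => v)
  have hlt : S.Pairwise (· < ·) := (hle.and hnd).imp (fun h => lt_of_le_of_ne h.1 h.2)
  set L := S.filter (· < q) with hL
  set E := S.filter (· = q) with hE
  set G := S.filter (q < ·) with hG
  have hmemL : ∀ v ∈ L, v < q := by
    intro v hv; have := (List.mem_filter.1 hv).2; simpa using this
  have hmemE : ∀ v ∈ E, v = q := by
    intro v hv; have := (List.mem_filter.1 hv).2; simpa using this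
  have hmemG : ∀ v ∈ G, q < v := by
    intro v hv; have := (List.mem_filter.1 hv).2; simpa using this
  have hfb : ∀ j v, j ∈ bucket v → f j = v := by
    intro j v hj
    simp only [hbucket, List.mem_filter, beq_iff_eq] at hj
    exact hj.2
  have hbq : E.flatMap bucket = bucket q := by
    rw [pvFilterEq q S hlt] at hE
    by_cases hm : q ∈ S
    · rw [hE, if_pos hm]; simp
    · rw [hE, if_neg hm]
      have hbqe : bucket q = [] := by
        rw [hbucket]
        refine List.filter_eq_nil_iff.2 (fun k hk hc => hm ?_)
        rw [hperm.mem_iff, hV, PySem.Set.mem_ofList]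
        exact (beq_iff_eq.1 hc) ▸ List.mem_map_of_mem hk
      rw [hbqe]; rfl
  have h0 : pvFlat f ks = S.flatMap bucket := rfl
  have hlhs : PySem.List.insertBy (fun a b => decide (f a < f b)) x (pvFlat f ks)
      = (L.flatMap bucket ++ E.flatMap bucket) ++ x :: G.flatMap bucket := by
    have hsplit : pvFlat f ks = (L.flatMap bucket ++ E.flatMap bucket) ++ G.flatMap bucket := by
      rw [h0]
      conv_lhs => rw [pvTri q S hlt, ← hL, ← hE, ← hG]
      simp [List.flatMap_append]
    rw [hsplit]
    refine pvInsertBy_split _ x _ _ ?_ ?_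
    · intro j hj
      rcases List.mem_append.1 hj with hj | hj <;>
        rcases List.mem_flatMap.1 hj with ⟨v, hv, hjv⟩
      · have := hmemL v hv; have := hfb j v hjv
        simp only [decide_eq_false_iff_not, not_lt, ← hq]; omega
      · have := hmemE v hv; have := hfb j v hjv
        simp only [decide_eq_false_iff_not, not_lt, ← hq]; omega
    · intro j hj
      rcases List.mem_flatMap.1 hj with ⟨v, hv, hjv⟩
      have := hmemG v hv; have := hfb j v hjv
      simp only [decide_eq_true_eq, ← hq]; omega
  have hsorted' : PySem.List.sorted (PySem.Set.add V q) (fun v => v) false = L ++ q :: G := by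
    refine PySem.List.sorted_eq_of_perm_of_pairwise_lt _ _ _ ?_ ?_
    · by_cases hm : q ∈ V
      · rw [PySem.Set.add_of_mem hm]
        have hmS : q ∈ S := hperm.mem_iff.2 hm
        have hSe : S = L ++ q :: G := by
          conv_lhs => rw [pvTri q S hlt, ← hL, ← hE, ← hG]
          rw [hE, pvFilterEq q S hlt, if_pos hmS]; simp
        rw [← hSe]; exact hperm
      · rw [PySem.Set.add_of_not_mem hm]
        have hmS : q ∉ S := fun c => hm (hperm.mem_iff.1 c)
        have hSLG : S = L ++ G := by
          conv_lhs => rw [pvTri q S hlt, ← hL, ← hE, ← hG]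
          rw [hE, pvFilterEq q S hlt, if_neg hmS]; simp
        have p1 : (L ++ q :: G).Perm ((L ++ G) ++ [q]) := by
          rw [List.append_assoc]
          exact List.Perm.append_left L (List.perm_append_singleton q G).symm
        have p2 : ((L ++ G) ++ [q]).Perm (V ++ [q]) := by
          rw [← hSLG]; exact hperm.append_right [q]
        exact p1.trans p2
    · have hLlt : L.Pairwise (· < ·) := hlt.sublist List.filter_sublist
      have hGlt : G.Pairwise (· < ·) := hlt.sublist List.filter_sublist
      refine List.pairwise_append.2 ⟨hLlt, ?_, ?_⟩
      · exact List.pairwise_cons.2 ⟨fun g hg => hmemG g hg, hGlt⟩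
      · intro a ha b hb
        have h1 : a < q := hmemL a ha
        rcases List.mem_cons.1 hb with rfl | hb
        · exact h1
        · have h2 : q < b := hmemG b hb; omega
  have hb' : ∀ v, (ks ++ [x]).filter (fun k => f k == v)
      = bucket v ++ (if f x == v then [x] else []) := by
    intro v; rw [List.filter_append, List.filter_singleton]; simp [Bool.cond_eq_ite, hbucket]
  have hrhs : pvFlat f (ks ++ [x])
      = L.flatMap bucket ++ (bucket q ++ [x]) ++ G.flatMap bucket := by
    have h1 : pvFlat f (ks ++ [x])
        = (PySem.List.sorted (PySem.Set.add V q) (fun v => v) false).flatMap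
            (fun v => (ks ++ [x]).filter (fun k => f k == v)) := by
      rw [pvFlat, List.map_append, List.map_singleton, ← hq, PySem.Set.ofList_append_singleton, ← hV]
    rw [h1, hsorted', List.flatMap_append, List.flatMap_cons]
    have hbL : L.flatMap (fun v => (ks ++ [x]).filter (fun k => f k == v)) = L.flatMap bucket := by
      refine List.flatMap_congr ?_
      intro v hv
      rw [hb', if_neg (by simp [← hq]; have := hmemL v hv; omega), List.append_nil]
    have hbG : G.flatMap (fun v => (ks ++ [x]).filter (fun k => f k == v)) = G.flatMap bucket := by
      refine List.flatMap_congr ?_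
      intro v hv
      rw [hb', if_neg (by simp [← hq]; have := hmemG v hv; omega), List.append_nil]
    rw [hbL, hbG, hb' q, if_pos (beq_iff_eq.mpr hq.symm)]
    simp
  rw [hlhs, hrhs, hbq]
  simp

theorem pvMain (f : Int → Int) (ks : List Int) :
    ks.foldl (fun acc x => PySem.List.insertBy (fun a b => decide (f a < f b)) x acc) [] = pvFlat f ks := by
  induction ks using List.reverseRecOn with
  | nil => simp [pvFlat, PySem.Set.ofList_nil, PySem.List.sorted]
  | append_singleton ks x ih => rw [List.foldl_append, List.foldl_cons, List.foldl_nil, ih, pvStep]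

theorem pvAStep (l : List Int) (d : PySem.Dict Int Int)
    (hd : ∀ k v, d.get? k = some v → 0 < v) :
    l.foldl (fun d i => if (d.get? i).getD 0 ≠ 0 then d.insert i (d.getD i 0 + 1) else d.insert i 1) d
      = l.foldl (fun d x => d.insert x (d.getD x 0 + 1)) d := by
  induction l generalizing d with
  | nil => rfl
  | cons x l ih =>
      simp only [List.foldl_cons]
      have hinv : ∀ w : Int, 0 < w → (∀ k v, (d.insert x w).get? k = some v → 0 < v) := by
        intro w hw k v h
        rw [PySem.Dict.get?_insert] at h
        split at h
        · cases h; exact hw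
        · exact hd k v h
      cases hx : d.get? x with
      | none =>
          have hgd : d.getD x 0 = 0 := by rw [PySem.Dict.getD_eq_get?_getD, hx]; rfl
          rw [show (if (none : Option Int).getD 0 ≠ 0 then d.insert x (d.getD x 0 + 1) else d.insert x 1)
              = d.insert x (d.getD x 0 + 1) from by simp [hgd]]
          exact ih _ (by rw [hgd]; exact hinv 1 one_pos)
      | some v =>
          have hv := hd x v hx
          have hgd : d.getD x 0 = v := by rw [PySem.Dict.getD_eq_get?_getD, hx]; rfl
          rw [show (if (some v).getD 0 ≠ 0 then d.insert x (d.getD x 0 + 1) else d.insert x 1)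
              = d.insert x (d.getD x 0 + 1) from by simp [hv.ne']]
          exact ih _ (by rw [hgd]; exact hinv (v + 1) (by omega))

theorem pvScanIns_eq (d : PySem.Dict Int Int) (i : Int) (sl : List Int) (h : sl ≠ []) :
    pvScanIns d i sl = PySem.List.insertBy (fun a b => decide (d.getD a 0 < d.getD b 0)) i sl := by
  induction sl with
  | nil => exact absurd rfl h
  | cons j rest ih =>
      unfold pvScanIns PySem.List.insertBy
      by_cases hij : d.getD i 0 < d.getD j 0
      · simp [hij]
      · cases rest with
        | nil => simp [hij, PySem.List.insertBy]
        | cons b t => simp [hij, ← ih (by simp)]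

theorem pvAFold (d : PySem.Dict Int Int) (l : List Int) (sl : List Int) (h : sl ≠ []) :
    l.foldl (fun sl i => pvScanIns d i sl) sl
      = l.foldl (fun sl i => PySem.List.insertBy (fun a b => decide (d.getD a 0 < d.getD b 0)) i sl) sl := by
  induction l generalizing sl with
  | nil => rfl
  | cons a l ih =>
      simp only [List.foldl_cons]
      rw [pvScanIns_eq d a sl h, ih _ (pvInsertBy_ne_nil _ _ _)]

theorem pvA (elements : List Int) (n : Int) (h : elements ≠ []) :
    nth_most_rare elements n
      = PySem.List.pyGetD (pvFlat (fun k => (elements.count k : Int)) (PySem.Set.ofList elements)) (n - 1) 0 := by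
  simp only [nth_most_rare]
  rw [pvAStep elements PySem.Dict.empty (by intro k v hkv; simp [PySem.Dict.get?_empty] at hkv),
      PySem.Dict.foldl_insert_getD_add_one_eq_counter, PySem.Dict.keys_counter,
      PySem.List.slice_from_one]
  have hf : (fun a => (PySem.Dict.counter elements).getD a 0) = (fun k => ((elements.count k : Nat) : Int)) :=
    funext (fun a => PySem.Dict.getD_counter elements a)
  obtain ⟨k0, kt, hks⟩ : ∃ k0 kt, PySem.Set.ofList elements = k0 :: kt := by
    cases hsx : PySem.Set.ofList elements with
    | nil =>
        obtain ⟨e, te, rfl⟩ : ∃ e te, elements = e :: te := by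
          cases elements with
          | nil => exact absurd rfl h
          | cons e te => exact ⟨e, te, rfl⟩
        have : e ∈ PySem.Set.ofList (e :: te) := (PySem.Set.mem_ofList _ _).2 (by simp)
        rw [hsx] at this; cases this
    | cons a b => exact ⟨a, b, rfl⟩
  rw [hks]
  simp only [List.tail_cons, PySem.List.pyGetD_zero_cons]
  rw [pvAFold _ _ _ (by simp)]
  have hstep : ∀ (g : List Int → Int → List Int) , kt.foldl g (g [] k0) = (k0 :: kt).foldl g [] := by
    intro g; rfl
  have h1 : PySem.List.insertBy (fun a b => decide ((PySem.Dict.counter elements).getD a 0 < (PySem.Dict.counter elements).getD b 0)) k0 [] = [k0] := by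
    simp [PySem.List.insertBy]
  rw [← h1, hstep (fun sl i => PySem.List.insertBy _ i sl)]
  rw [show (fun a b => decide ((PySem.Dict.counter elements).getD a 0 < (PySem.Dict.counter elements).getD b 0))
        = (fun a b => decide ((elements.count a : Int) < (elements.count b : Int))) by
      funext a b; rw [PySem.Dict.getD_counter, PySem.Dict.getD_counter]]
  rw [pvMain (fun k => (elements.count k : Int)) (k0 :: kt), ← hks]

theorem pvBPair (l : List Int) (d : PySem.Dict Int Int) :
    l.foldl (fun (st : PySem.Dict Int Int × List Int) x =>
        if st.1.contains x then (st.1.insert x (st.1.getD x 0 + 1), st.2)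
        else (st.1.insert x 1, st.2 ++ [x])) (d, d.keys)
      = (l.foldl (fun d x => d.insert x (d.getD x 0 + 1)) d,
         (l.foldl (fun d x => d.insert x (d.getD x 0 + 1)) d).keys) := by
  induction l generalizing d with
  | nil => rfl
  | cons x l ih =>
      simp only [List.foldl_cons]
      cases hc : d.contains x with
      | true =>
          rw [if_pos rfl]
          have hk : d.keys = (d.insert x (d.getD x 0 + 1)).keys :=
            (PySem.Dict.keys_insert_of_contains d _ hc).symm
          rw [hk, ih]
      | false =>
          rw [if_neg (by simp)]
          have hg : d.getD x 0 = 0 := PySem.Dict.getD_of_not_contains d 0 hc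
          have h1 : d.insert x 1 = d.insert x (d.getD x 0 + 1) := by rw [hg]; norm_num
          have hk : d.keys ++ [x] = (d.insert x (d.getD x 0 + 1)).keys :=
            (PySem.Dict.keys_insert_of_not_contains d _ hc).symm
          rw [h1, hk, ih]

theorem pvB (elements : List Int) (n : Int) :
    nth_most_rare_alt elements n
      = PySem.List.pyGetD (pvFlat (fun k => (elements.count k : Int)) (PySem.Set.ofList elements)) (n - 1) 0 := by
  simp only [nth_most_rare_alt]
  rw [show (PySem.Dict.empty, ([] : List Int)) = ((PySem.Dict.empty : PySem.Dict Int Int), (PySem.Dict.empty : PySem.Dict Int Int).keys) from rfl,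
      pvBPair, PySem.Dict.foldl_insert_getD_add_one_eq_counter]
  set C := PySem.Dict.counter elements with hC
  set f : Int → Int := fun k => (elements.count k : Int) with hf
  have hCg : ∀ x, C.getD x 0 = f x := fun x => PySem.Dict.getD_counter elements x
  have hkeys : C.keys = PySem.Set.ofList elements := PySem.Dict.keys_counter elements
  set ks := PySem.Set.ofList elements with hks
  -- buckets
  set B := C.keys.foldl (fun (b : PySem.Dict Int (List Int)) x => b.modify (C.getD x 0) [] (· ++ [x])) PySem.Dict.empty with hB
  have hfold : B = (C.keys.map (fun x => (f x, x))).foldl (fun (b : PySem.Dict Int (List Int)) p => b.modify p.1 [] (· ++ [p.2])) PySem.Dict.empty := by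
    rw [hB, List.foldl_map]
    exact PySem.List.foldl_congr_mem C.keys
      (fun (b : PySem.Dict Int (List Int)) x => b.modify (C.getD x 0) [] (· ++ [x]))
      (fun (b : PySem.Dict Int (List Int)) x => b.modify (f x, x).1 [] (· ++ [(f x, x).2]))
      PySem.Dict.empty
      (fun acc x _ => by simp only [hCg])
  have hbk : B.keys = PySem.Set.ofList (ks.map f) := by
    rw [hfold, PySem.Dict.keys_foldl_modify_key ((C.keys.map (fun x => (f x, x)))) (fun p => p.1) [] (fun _ p => (· ++ [p.2]))]
    rw [List.map_map]
    rw [show (PySem.Dict.empty : PySem.Dict Int (List Int)).keys = [] from rfl]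
    rw [PySem.Set.update_nil_left, hkeys]
    rfl
  have hbg : ∀ c, B.getD c [] = ks.filter (fun k => f k == c) := by
    intro c
    rw [hfold, PySem.Dict.getD_foldl_modify_append]
    rw [show (PySem.Dict.empty : PySem.Dict Int (List Int)).getD c [] = [] from rfl]
    rw [List.filter_map, List.map_map, hkeys]
    simp [Function.comp_def]
  rw [hbk]
  rw [PySem.List.foldl_append_eq_flatMap]
  have hflat : (PySem.List.sorted (PySem.Set.ofList (ks.map f)) (fun v => v) false).flatMap (fun c => B.getD c [])
      = pvFlat f ks := by
    rw [pvFlat]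
    exact List.flatMap_congr (fun c _ => hbg c)
  rw [List.nil_append, hflat]

-- ===== VERDICT (by name: the statement is the Claim_ definition above) =====
theorem nth_most_rare_spec : Claim_equal_nth_most_rare := by
  intro elements n _ hpre
  unfold Spec_nth_most_rare
  rw [pvA elements n hpre.1, pvB]
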